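-- pv_equiv track=rewrite | github.com/Suhani-SK-Singh/Python-Practice | basic_DS.py | firstcubeabove
-- ===== SOURCE A (Python) =====
-- def is_cube(n):
--     r = range(0, n) if n > 0 else range(n, 1)
--     for val in r:
--         cube_val = val ** 3
--         if cube_val == n:
--             return True
--             break
--     return False
--
-- def firstcubeabove(n):
--     search=False
--     var=n
--     while search !=True:
--         var = var + 1
--         num=is_cube(var)
--         if num==True:
--             return(var)
--             search=False
-- ===== SOURCE B (Python) =====
-- def firstcubeabove(n):
--     # Binary search for the smallest integer k with k**3 > n; return k**3.
--     lo = -abs(n) - 2   # lo**3 <= n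
--     hi = abs(n) + 2    # hi**3 > n
--     while hi - lo > 1:
--         mid = (lo + hi) // 2
--         if mid ** 3 <= n:
--             lo = mid
--         else:
--             hi = mid
--     return hi ** 3
-- ===== Notes on version B (the rewrite author's own statement) =====
-- stated objective: faster
-- what changed: Replaced A's linear scan (try n+1, n+2, ... each tested by an O(var) range scan in is_cube) with a binary search for the integer cube root, returning the next cube directly.
-- intended difference: For n = 0 A returns 8 because is_cube tests only roots strictly below a positive argument and so misses 1; B returns 1, the smallest perfect cube greater than 0, which is the intended value. — e.g. on firstcubeabove(0): A returns 8, B returns 1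
import Mathlib
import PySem

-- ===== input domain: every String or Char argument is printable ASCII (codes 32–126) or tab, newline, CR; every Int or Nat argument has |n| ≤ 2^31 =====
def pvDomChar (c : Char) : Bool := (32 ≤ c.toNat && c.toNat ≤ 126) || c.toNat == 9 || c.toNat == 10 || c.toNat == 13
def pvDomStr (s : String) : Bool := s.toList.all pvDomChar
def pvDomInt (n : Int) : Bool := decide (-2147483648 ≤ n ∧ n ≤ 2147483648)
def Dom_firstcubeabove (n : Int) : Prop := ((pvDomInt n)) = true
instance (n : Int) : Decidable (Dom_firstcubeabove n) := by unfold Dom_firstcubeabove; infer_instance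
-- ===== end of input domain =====

-- B replaces A's linear scan with a binary search for the integer cube root (faster);
-- on n = 0 A returns 8 (its is_cube misses the cube 1) while B returns the intended 1 — see D_ below.

-- ===== PORT A =====
-- is_cube(n): scans range(0,n) (n>0) or range(n,1) (else) for a value whose cube is n.
def isCube (n : Int) : Bool :=
  let r := if n > 0 then PySem.List.pyRange 0 n 1 else PySem.List.pyRange n 1 1
  r.any (fun val => val ^ 3 == n)

-- the 'while' loop of firstcubeabove; the fuel only makes it total (never exhausted: fcaLoop_reach)
def fcaLoop : Nat → Int → Int
  | 0, var => var + 1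
  | fuel + 1, var =>
    let var' := var + 1
    if isCube var' then var' else fcaLoop fuel var'

def firstcubeabove (n : Int) : Int := fcaLoop ((n.natAbs + 3) ^ 3) n

-- ===== PORT B =====
-- the 'while hi - lo > 1' loop; invariant lo^3 ≤ n < hi^3, returns hi^3;
-- fuel only makes it total (the gap shrinks every step, so the initial gap is enough fuel)
def bsLoop : Nat → Int → Int → Int → Int
  | 0, _, _, hi => hi ^ 3
  | fuel + 1, n, lo, hi =>
    if hi - lo > 1 then
      if (PySem.Int.floordiv (lo + hi) 2) ^ 3 ≤ n then bsLoop fuel n (PySem.Int.floordiv (lo + hi) 2) hi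
      else bsLoop fuel n lo (PySem.Int.floordiv (lo + hi) 2)
    else hi ^ 3

def firstcubeabove_alt (n : Int) : Int :=
  bsLoop (2 * n.natAbs + 4) n (-(n.natAbs : Int) - 2) ((n.natAbs : Int) + 2)

-- ===== PRECONDITION & SPEC =====
-- For n = 0 A returns 8 (is_cube scans only range(0, m) for positive m, so it never sees the root 1
-- and misses the cube 1); B returns 1, the smallest perfect cube greater than 0, the intended value.
def D_firstcubeabove (n : Int) : Prop := n = 0
instance (n : Int) : Decidable (D_firstcubeabove n) := by unfold D_firstcubeabove; infer_instance
def Spec_firstcubeabove (n : Int) (out : Int) : Prop := ¬ D_firstcubeabove n → out = firstcubeabove_alt n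
instance (n : Int) (out : Int) : Decidable (Spec_firstcubeabove n out) := by unfold Spec_firstcubeabove; infer_instance
def pvDiffWitness_firstcubeabove : Int := 0
def pvDiffWitnessOut_firstcubeabove : Int × Int := (8, 1)

-- ===== CLAIM (what is proved, stated in full; the proofs are below) =====
def Claim_unchanged_firstcubeabove : Prop := ∀ (n : Int), Dom_firstcubeabove n → Spec_firstcubeabove n (firstcubeabove n)
def Claim_changed_firstcubeabove : Prop := Dom_firstcubeabove (pvDiffWitness_firstcubeabove) ∧ D_firstcubeabove (pvDiffWitness_firstcubeabove) ∧ firstcubeabove (pvDiffWitness_firstcubeabove) = pvDiffWitnessOut_firstcubeabove.1 ∧ firstcubeabove_alt (pvDiffWitness_firstcubeabove) = pvDiffWitnessOut_firstcubeabove.2 ∧ pvDiffWitnessOut_firstcubeabove.1 ≠ pvDiffWitnessOut_firstcubeabove.2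
def Claim_exact_firstcubeabove : Prop := ∀ (n : Int), Dom_firstcubeabove n → D_firstcubeabove n → firstcubeabove n ≠ firstcubeabove_alt n

-- ===== LEMMAS AND PROOFS =====

theorem cube_lt_cube {a b : Int} (h : a < b) : a ^ 3 < b ^ 3 := by
  nlinarith [sq_nonneg (a + b), sq_nonneg a, sq_nonneg b, sq_nonneg (a - b)]

theorem cube_le_cube {a b : Int} (h : a ≤ b) : a ^ 3 ≤ b ^ 3 := by
  rcases h.lt_or_eq with h | h
  · exact le_of_lt (cube_lt_cube h)
  · simp [h]

-- is_cube m = true  ↔  m is a cube whose root is ≤ 0 or ≥ 2 (the root 1 is never tested)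
theorem isCube_iff (m : Int) : isCube m = true ↔ ∃ k : Int, k ^ 3 = m ∧ (k ≤ 0 ∨ 2 ≤ k) := by
  unfold isCube
  simp only [List.any_eq_true, beq_iff_eq]
  constructor
  · rintro ⟨k, hk, h3⟩
    split at hk <;> rw [PySem.List.mem_pyRange_one] at hk
    · refine ⟨k, h3, ?_⟩
      by_cases h1 : k = 1
      · exfalso; subst h1; simp at h3; omega
      · omega
    · exact ⟨k, h3, Or.inl (by omega)⟩
  · rintro ⟨k, h3, hk⟩
    refine ⟨k, ?_, h3⟩
    split <;> rw [PySem.List.mem_pyRange_one]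
    · rcases hk with hk | hk
      · exfalso
        have h0 : k ^ 3 ≤ 0 := by nlinarith [sq_nonneg (k+1), sq_nonneg k]
        linarith
      · constructor
        · omega
        · calc k < k ^ 3 := by nlinarith [sq_nonneg (k-1), sq_nonneg k]
               _ = m := h3
    · rcases hk with hk | hk
      · constructor
        · calc m = k ^ 3 := h3.symm
               _ ≤ k := by nlinarith [sq_nonneg (k+1), sq_nonneg k]
        · omega
      · exfalso
        have h0 : 0 < k ^ 3 := by positivity
        linarith

-- A's loop returns the first var > start with isCube var, given enough fuel
theorem fcaLoop_reach : ∀ (fuel : Nat) (var m : Int), var < m → (m - var).toNat ≤ fuel →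
    isCube m = true → (∀ j, var < j → j < m → isCube j = false) → fcaLoop fuel var = m := by
  intro fuel
  induction fuel with
  | zero => intro var m h1 h2 _ _; omega
  | succ fuel ih =>
    intro var m h1 h2 hm hmid
    show (if isCube (var + 1) then var + 1 else fcaLoop fuel (var + 1)) = m
    by_cases heq : var + 1 = m
    · rw [heq, hm]; simp
    · have hlt : var + 1 < m := by omega
      rw [hmid (var + 1) (by omega) hlt]
      simp only [Bool.false_eq_true, if_false]
      exact ih (var + 1) m hlt (by omega) hm (fun j hj1 hj2 => hmid j (by omega) hj2)

-- B's loop: under the invariant it returns u^3 with (u-1)^3 ≤ n < u^3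
theorem bsLoop_spec (n : Int) : ∀ (fuel : Nat) (lo hi : Int), (hi - lo).toNat ≤ fuel →
    lo ^ 3 ≤ n → n < hi ^ 3 → lo < hi →
    ∃ u : Int, bsLoop fuel n lo hi = u ^ 3 ∧ (u - 1) ^ 3 ≤ n ∧ n < u ^ 3 := by
  intro fuel
  induction fuel with
  | zero => intro lo hi h _ _ hlt; omega
  | succ fuel ih =>
    intro lo hi hfuel hlo hhi hlt
    rw [bsLoop]
    have hmid : PySem.Int.floordiv (lo + hi) 2 = (lo + hi) / 2 :=
      PySem.Int.floordiv_eq_ediv_of_pos (by omega)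
    split_ifs with hgap hc
    · exact ih (PySem.Int.floordiv (lo + hi) 2) hi (by rw [hmid]; omega) hc hhi (by rw [hmid]; omega)
    · exact ih lo (PySem.Int.floordiv (lo + hi) 2) (by rw [hmid]; omega) hlo (by omega) (by rw [hmid]; omega)
    · refine ⟨hi, rfl, ?_, hhi⟩
      have h1 : hi - 1 ≤ lo := by omega
      calc (hi - 1) ^ 3 ≤ lo ^ 3 := cube_le_cube h1
           _ ≤ n := hlo

-- characterisation of B: firstcubeabove_alt n is the smallest cube strictly above n
theorem alt_spec (n : Int) : ∃ u : Int, firstcubeabove_alt n = u ^ 3 ∧ (u - 1) ^ 3 ≤ n ∧ n < u ^ 3 := by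
  unfold firstcubeabove_alt
  have ha : (0 : Int) ≤ (n.natAbs : Int) := Int.natCast_nonneg _
  have hn : -(n.natAbs : Int) ≤ n ∧ n ≤ (n.natAbs : Int) := ⟨by omega, Int.le_natAbs⟩
  have h1 : (-(n.natAbs : Int) - 2) ^ 3 ≤ n := by
    have : (-(n.natAbs : Int) - 2) ^ 3 ≤ -(n.natAbs : Int) - 2 := by
      nlinarith [sq_nonneg (-(n.natAbs : Int) - 1), sq_nonneg ((n.natAbs : Int) + 2)]
    omega
  have h2 : n < ((n.natAbs : Int) + 2) ^ 3 := by
    have : (n.natAbs : Int) + 2 ≤ ((n.natAbs : Int) + 2) ^ 3 := by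
      nlinarith [sq_nonneg ((n.natAbs : Int) + 1), sq_nonneg ((n.natAbs : Int) + 2)]
    omega
  exact bsLoop_spec n (2 * n.natAbs + 4) (-(n.natAbs : Int) - 2) ((n.natAbs : Int) + 2)
    (by omega) h1 h2 (by omega)

theorem main_equiv (n : Int) (hn : n ≠ 0) : firstcubeabove n = firstcubeabove_alt n := by
  obtain ⟨u, halt, hle, hlt⟩ := alt_spec n
  have hu1 : u ≤ 0 ∨ 2 ≤ u := by
    by_contra h
    push Not at h
    have : u = 1 := by omega
    subst this
    simp at hle hlt
    omega
  rw [halt]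
  unfold firstcubeabove
  apply fcaLoop_reach
  · exact hlt
  · -- fuel bound: u^3 - n ≤ (|n|+3)^3
    have hub : u ≤ (n.natAbs : Int) + 2 := by
      by_contra h
      push Not at h
      have h2 : ((n.natAbs : Int) + 2) ^ 3 ≤ (u - 1) ^ 3 := cube_le_cube (by omega)
      have h3 : n < ((n.natAbs : Int) + 2) ^ 3 := by
        nlinarith [Int.natCast_nonneg n.natAbs, Int.le_natAbs (a := n),
          sq_nonneg ((n.natAbs : Int) + 1), sq_nonneg ((n.natAbs : Int) + 2)]
      omega
    have h4 : u ^ 3 ≤ ((n.natAbs : Int) + 2) ^ 3 := cube_le_cube hub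
    have h5 : ((n.natAbs : Int) + 2) ^ 3 + (n.natAbs : Int) ≤ ((n.natAbs : Int) + 3) ^ 3 := by
      nlinarith [Int.natCast_nonneg n.natAbs]
    have h6 : -(n.natAbs : Int) ≤ n := by omega
    have h7 : (((n.natAbs + 3) ^ 3 : Nat) : Int) = ((n.natAbs : Int) + 3) ^ 3 := by push_cast; ring
    omega
  · rw [isCube_iff]; exact ⟨u, rfl, hu1⟩
  · intro j hj1 hj2
    by_contra h
    simp only [Bool.not_eq_false] at h
    rw [isCube_iff] at h
    obtain ⟨k, hk3, _⟩ := h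
    -- j = k^3 with n < j < u^3 contradicts u^3 being the smallest cube > n
    have hku : k < u := by
      by_contra hk
      push Not at hk
      have := cube_le_cube hk
      omega
    have : k ^ 3 ≤ (u - 1) ^ 3 := cube_le_cube (by omega)
    omega

-- ===== VERDICT (by name: the statement is the Claim_ definition above) =====
theorem firstcubeabove_spec : Claim_unchanged_firstcubeabove := by
  intro n _ hD
  exact main_equiv n hD

theorem firstcubeabove_changed : Claim_changed_firstcubeabove := by
  unfold Claim_changed_firstcubeabove; decide

theorem firstcubeabove_tight : Claim_exact_firstcubeabove := by
  intro n _ hD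
  subst hD
  decide
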